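-- pv_equiv track=rewrite | github.com/Arsen1302/Code-copy-detector | TestData/solutions/problem_235_2_1.py | solution_235_2_1
-- ===== SOURCE A (Python) =====
-- def solution_235_2_1(start: str, end: str, bank: list[str]) -> int:
--     bank = set(bank) | {start}
--
--     def solution_235_2_2(st0, cnt):
--         if st0 == end:
--             return cnt
--
--         bank.remove(st0)
--         for i, ch0 in enumerate(st0):
--             for ch1 in "ACGT":
--                 if (
--                     ch0 != ch1
--                     and (st1 := st0[:i] + ch1 + st0[i + 1 :]) in bank
--                     and (res := solution_235_2_2(st1, cnt + 1)) != -1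
--                 ):
--                     return res
--
--         return -1
--
--     return solution_235_2_2(start, 0)
-- ===== SOURCE B (Python) =====
-- def solution_235_2_1(start: str, end: str, bank: list[str]) -> int:
--     bank = set(bank) | {start}
--     stack = [(start, 0)]
--     while stack:
--         st0, cnt = stack.pop()
--         if st0 == end:
--             return cnt
--         if st0 not in bank:
--             continue  # already visited via an earlier branch
--         bank.remove(st0)
--         nbrs = [st0[:i] + ch + st0[i + 1:]
--                 for i in range(len(st0)) for ch in "ACGT" if st0[i] != ch]
--         for st1 in reversed(nbrs):
--             if st1 in bank:
--                 stack.append((st1, cnt + 1))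
--     return -1
-- ===== Notes on version B (the rewrite author's own statement) =====
-- stated objective: alternative
-- what changed: The nested recursive DFS closure sharing a mutable bank is replaced by an iterative DFS with an explicit stack of (state, depth) pairs: neighbors are pushed in reverse order so the first-generated neighbor is explored first, membership is re-checked at pop time, and the bank itself serves as the visited set.
import Mathlib
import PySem

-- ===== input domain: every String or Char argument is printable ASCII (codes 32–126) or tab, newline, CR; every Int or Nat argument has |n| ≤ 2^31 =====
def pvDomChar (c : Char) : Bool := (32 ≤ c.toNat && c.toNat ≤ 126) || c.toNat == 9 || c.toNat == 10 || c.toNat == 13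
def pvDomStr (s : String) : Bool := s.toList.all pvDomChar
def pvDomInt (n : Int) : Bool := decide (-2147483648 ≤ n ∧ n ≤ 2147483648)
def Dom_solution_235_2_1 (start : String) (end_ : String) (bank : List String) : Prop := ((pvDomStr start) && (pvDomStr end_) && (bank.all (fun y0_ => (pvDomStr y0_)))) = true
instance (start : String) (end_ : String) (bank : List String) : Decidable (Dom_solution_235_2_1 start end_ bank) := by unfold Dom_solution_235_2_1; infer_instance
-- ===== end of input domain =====

-- B rewrites A's recursive DFS (shared mutable bank) as an iterative explicit-stack DFS visiting
-- the same states in the same order; the proof shows the two traversals return the same value.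

-- Shared by both ports: the single-mutation candidates of st0, in Python's generation order
-- (positions left to right, then "ACGT", keeping only ch ≠ st0[i]); both Pythons generate them
-- with the identical comprehension/loop, so the helper is shared.
def pvNeighbors (s : String) : List String :=
  let cs := s.toList
  (List.range cs.length).flatMap fun i =>
    (['A', 'C', 'G', 'T'].filter fun ch => cs.getD i 'A' != ch).map fun ch =>
      String.ofList (cs.take i ++ ch :: cs.drop (i + 1))

-- ===== PORT A =====
-- A's inner closure `solution_235_2_2`, with the mutable `bank` threaded as state and a fuel
-- argument standing for the (bounded) recursion depth: every recursive call first removes a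
-- member of `bank`, so depth ≤ |bank| + 1 and the fuel chosen at the top level never runs out.
-- `bank.remove(st0)` is ported as `Set.discard`: st0 is always a member where A reaches it.
mutual
def pvSolveA (end_ : String) : Nat → String → Int → PySem.Set String → Int × PySem.Set String
  | 0, _, _, bank => (-1, bank)      -- fuel exhausted (unreachable at the top-level fuel)
  | f + 1, st0, cnt, bank =>
    if st0 = end_ then (cnt, bank)
    else pvGoA end_ f (pvNeighbors st0) cnt (PySem.Set.discard bank st0)

def pvGoA (end_ : String) : Nat → List String → Int → PySem.Set String → Int × PySem.Set String
  | _, [], _, bank => (-1, bank)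
  | f, st1 :: rest, cnt, bank =>
    if PySem.Set.contains bank st1 then
      let p := pvSolveA end_ f st1 (cnt + 1) bank
      if p.1 ≠ -1 then p else pvGoA end_ f rest cnt p.2
    else pvGoA end_ f rest cnt bank
end

def solution_235_2_1 (start : String) (end_ : String) (bank : List String) : Int :=
  (pvSolveA end_ (bank.length + 2) start 0 (PySem.Set.add (PySem.Set.ofList bank) start)).1

-- ===== PORT B =====
-- B's while loop over the explicit stack; pushing the in-bank neighbors in reversed order is
-- exactly prepending them (in generation order) to the remaining stack.
def pvRunB (end_ : String) : List (String × Int) → PySem.Set String → Int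
  | [], _ => -1
  | (st0, cnt) :: rest, bank =>
    if st0 = end_ then cnt
    else if PySem.Set.contains bank st0 then
      let bank' := PySem.Set.discard bank st0
      pvRunB end_
        (((pvNeighbors st0).filter (fun s => PySem.Set.contains bank' s)).map
            (fun s => (s, cnt + 1)) ++ rest) bank'
    else pvRunB end_ rest bank
termination_by stack bank => (bank.length, stack.length)
decreasing_by
  · refine Prod.Lex.left _ _ ?_
    have h : st0 ∈ bank := by
      simpa [PySem.Set.contains] using (by assumption : PySem.Set.contains bank st0 = true)
    have hlt : (List.filter (fun y => !(y == st0)) bank).length < bank.length :=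
      List.length_filter_lt_length_iff_exists.mpr ⟨st0, h, by simp⟩
    simpa [PySem.Set.discard] using hlt
  · exact Prod.Lex.right _ (by simp)

def solution_235_2_1_alt (start : String) (end_ : String) (bank : List String) : Int :=
  pvRunB end_ [(start, 0)] (PySem.Set.add (PySem.Set.ofList bank) start)

-- ===== PRECONDITION & SPEC =====
def Spec_solution_235_2_1 (start : String) (end_ : String) (bank : List String) (out : Int) : Prop := out = solution_235_2_1_alt start end_ bank
instance (start : String) (end_ : String) (bank : List String) (out : Int) : Decidable (Spec_solution_235_2_1 start end_ bank out) := by unfold Spec_solution_235_2_1; infer_instance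

-- ===== CLAIM (what is proved, stated in full; the proofs are below) =====
def Claim_equal_solution_235_2_1 : Prop := ∀ (start : String) (end_ : String) (bank : List String), Dom_solution_235_2_1 start end_ bank → Spec_solution_235_2_1 start end_ bank (solution_235_2_1 start end_ bank)

-- ===== LEMMAS AND PROOFS =====

theorem pv_discard_sublist (s : PySem.Set String) (x : String) :
    (PySem.Set.discard s x).Sublist s := by
  simp [PySem.Set.discard]

-- the bank after a call of A's DFS is a sublist of the bank before (it only shrinks)
theorem pv_sub (e : String) (f : Nat) :
    (∀ st c bank, ((pvSolveA e f st c bank).2).Sublist bank) ∧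
    (∀ (l : List String) c bank, ((pvGoA e f l c bank).2).Sublist bank) := by
  induction f with
  | zero =>
    refine ⟨fun st c bank => by simp [pvSolveA], fun l c bank => ?_⟩
    induction l generalizing c bank with
    | nil => simp [pvGoA]
    | cons st1 rest ih =>
      simp only [pvGoA, pvSolveA]
      split
      · simpa using (ih c bank)
      · exact ih c bank
  | succ f ih =>
    have hS : ∀ st c bank, ((pvSolveA e (f + 1) st c bank).2).Sublist bank := by
      intro st c bank
      simp only [pvSolveA]
      split
      · exact List.Sublist.refl _
      · exact (ih.2 _ _ _).trans (pv_discard_sublist bank st)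
    refine ⟨hS, fun l c bank => ?_⟩
    induction l generalizing c bank with
    | nil => simp [pvGoA]
    | cons st1 rest ihl =>
      simp only [pvGoA]
      split
      · split
        · exact hS _ _ _
        · exact (ihl _ _).trans (hS _ _ _)
      · exact ihl _ _

-- A's DFS never removes `e` from the bank
theorem pv_end_mem (e : String) (f : Nat) :
    (∀ st c bank, e ∈ bank → e ∈ (pvSolveA e f st c bank).2) ∧
    (∀ (l : List String) c bank, e ∈ bank → e ∈ (pvGoA e f l c bank).2) := by
  induction f with
  | zero =>
    refine ⟨fun st c bank h => by simpa [pvSolveA] using h, fun l c bank h => ?_⟩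
    induction l generalizing c bank with
    | nil => simpa [pvGoA] using h
    | cons st1 rest ih =>
      simp only [pvGoA, pvSolveA]
      split
      · simpa using (ih c bank h)
      · exact ih c bank h
  | succ f ih =>
    have hS : ∀ st c bank, e ∈ bank → e ∈ (pvSolveA e (f + 1) st c bank).2 := by
      intro st c bank h
      simp only [pvSolveA]
      split
      · exact h
      · refine ih.2 _ _ _ ?_
        rename_i hne
        simp only [PySem.Set.discard, List.mem_filter]
        exact ⟨h, by simp [Ne.symm hne]⟩
    refine ⟨hS, fun l c bank h => ?_⟩
    induction l generalizing c bank with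
    | nil => simpa [pvGoA] using h
    | cons st1 rest ihl =>
      simp only [pvGoA]
      split
      · split
        · exact hS _ _ _ h
        · exact ihl _ _ (hS _ _ _ h)
      · exact ihl _ _ h

theorem pv_contains_iff (bank : PySem.Set String) (x : String) :
    PySem.Set.contains bank x = true ↔ x ∈ bank := by
  simp [PySem.Set.contains]

-- the loop half of the correspondence, given the recursion half at the same fuel
theorem pv_g (e : String) (f : Nat)
    (HS : ∀ st c (bank : PySem.Set String) rest, 0 ≤ c → st ∈ bank → bank.length ≤ f →
      pvRunB e ((st, c) :: rest) bank =
        (let p := pvSolveA e f st c bank;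
         if p.1 = -1 then pvRunB e rest p.2 else p.1)) :
    ∀ (l : List String) c (bank bank₀ : PySem.Set String) rest, 0 ≤ c →
      bank.Sublist bank₀ → (e ∈ bank₀ → e ∈ bank) → bank.length ≤ f →
      pvRunB e ((l.filter (fun s => PySem.Set.contains bank₀ s)).map
          (fun s => (s, c + 1)) ++ rest) bank =
        (let p := pvGoA e f l c bank;
         if p.1 = -1 then pvRunB e rest p.2 else p.1) := by
  intro l
  induction l with
  | nil =>
    intro c bank bank₀ rest _ _ _ _
    simp [pvGoA]
  | cons st1 rest' ihl =>
    intro c bank bank₀ rest hc hsub hend hlen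
    by_cases h0 : PySem.Set.contains bank₀ st1 = true
    · -- st1 was pushed
      simp only [List.filter_cons, h0, if_pos, List.map_cons, List.cons_append]
      by_cases hmem : st1 ∈ bank
      · have h1 : 1 ≤ f := le_trans (by cases bank with
          | nil => exact absurd hmem (by simp)
          | cons a t => simp) hlen
        by_cases heq : st1 = e
        · -- popping e returns immediately; A's recursion on e returns too (e ∈ bank)
          subst heq
          rw [pvRunB]
          simp only [reduceIte]
          obtain ⟨f', rfl⟩ : ∃ f', f = f' + 1 := ⟨f - 1, by omega⟩
          simp only [pvGoA, (pv_contains_iff bank st1).mpr hmem, if_pos, pvSolveA]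
          have : ¬ (c + 1 = -1) := by omega
          simp [this]
        · -- explore st1 via the recursion half, then continue with the shrunk bank
          rw [HS st1 (c + 1) bank _ (by omega) hmem hlen]
          simp only [pvGoA, (pv_contains_iff bank st1).mpr hmem, if_pos]
          by_cases hres : (pvSolveA e f st1 (c + 1) bank).1 = -1
          · have hsub' := (pv_sub e f).1 st1 (c + 1) bank
            have := ihl c (pvSolveA e f st1 (c + 1) bank).2 bank₀ rest hc
              (hsub'.trans hsub)
              (fun he => (pv_end_mem e f).1 st1 (c + 1) bank (hend he))
              (le_trans hsub'.length_le hlen)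
            rw [if_pos hres]
            have hif : (if (pvSolveA e f st1 (c + 1) bank).1 ≠ -1 then pvSolveA e f st1 (c + 1) bank
                else pvGoA e f rest' c (pvSolveA e f st1 (c + 1) bank).2)
                = pvGoA e f rest' c (pvSolveA e f st1 (c + 1) bank).2 := if_neg (fun h => h hres)
            rw [hif]
            exact this
          · simp [hres]
      · -- pushed earlier but already visited: pop-time guard skips it, A's loop guard skips too
        have hne : st1 ≠ e := fun heq => hmem (heq ▸ hend (heq ▸ ((pv_contains_iff bank₀ st1).mp h0)))
        have hcont : ¬ (PySem.Set.contains bank st1 = true) := by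
          simpa [pv_contains_iff] using hmem
        rw [pvRunB]
        simp only [if_neg hne, if_neg hcont]
        simp only [pvGoA, if_neg hcont]
        exact ihl c bank bank₀ rest hc hsub hend hlen
    · -- never pushed: A's loop guard skips it as well (bank ⊆ bank₀)
      have hmem : st1 ∉ bank := fun h =>
        h0 ((pv_contains_iff bank₀ st1).mpr (hsub.subset h))
      have hcont : PySem.Set.contains bank st1 ≠ true := by
        simpa [pv_contains_iff] using hmem
      simp only [List.filter_cons, h0, Bool.false_eq_true, pvGoA, if_neg hcont]
      exact ihl c bank bank₀ rest hc hsub hend hlen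

-- the recursion half: B's machine popping (st, c) equals running A's recursion and continuing
theorem pv_s (e : String) (f : Nat) :
    ∀ st c (bank : PySem.Set String) rest, 0 ≤ c → (st ∈ bank ∨ st = e) →
      bank.length ≤ f → 1 ≤ f →
      pvRunB e ((st, c) :: rest) bank =
        (let p := pvSolveA e f st c bank;
         if p.1 = -1 then pvRunB e rest p.2 else p.1) := by
  induction f with
  | zero => intro _ _ _ _ _ _ _ h; omega
  | succ f ih =>
    intro st c bank rest hc hst hlen _
    by_cases heq : st = e
    · subst heq
      rw [pvRunB]
      simp only [reduceIte, pvSolveA]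
      have : ¬ (c = -1) := by omega
      simp [this]
    · rcases hst with hmem | rfl
      swap
      · exact absurd rfl heq
      have hcont := (pv_contains_iff bank st).mpr hmem
      rw [pvRunB]
      simp only [if_neg heq, hcont, if_pos]
      have hlt : (PySem.Set.discard bank st).length < bank.length := by
        have hlt' : (List.filter (fun y => !(y == st)) bank).length < bank.length :=
          List.length_filter_lt_length_iff_exists.mpr ⟨st, hmem, by simp⟩
        simpa [PySem.Set.discard] using hlt'
      have HS : ∀ st' c' (bank' : PySem.Set String) rest', 0 ≤ c' → st' ∈ bank' →
          bank'.length ≤ f →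
          pvRunB e ((st', c') :: rest') bank' =
            (let p := pvSolveA e f st' c' bank';
             if p.1 = -1 then pvRunB e rest' p.2 else p.1) := by
        intro st' c' bank' rest' hc' hmem' hlen'
        have : 1 ≤ f := le_trans (by cases bank' with
          | nil => exact absurd hmem' (by simp)
          | cons a t => simp) hlen'
        exact ih st' c' bank' rest' hc' (Or.inl hmem') hlen' this
      have := pv_g e f HS (pvNeighbors st) c (PySem.Set.discard bank st)
        (PySem.Set.discard bank st) rest hc (List.Sublist.refl _) id (by omega)
      simp only [pvSolveA, if_neg heq]
      exact this

theorem pv_ofList_len (xs : List String) : (PySem.Set.ofList xs).length ≤ xs.length := by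
  have aux : ∀ (ys : List String) (s : PySem.Set String),
      (ys.foldl PySem.Set.add s).length ≤ s.length + ys.length := by
    intro ys
    induction ys with
    | nil => simp
    | cons y t ih =>
      intro s
      have h1 : (PySem.Set.add s y).length ≤ s.length + 1 := by
        unfold PySem.Set.add; split <;> simp
      calc ((y :: t).foldl PySem.Set.add s).length
          = (t.foldl PySem.Set.add (PySem.Set.add s y)).length := by simp
        _ ≤ (PySem.Set.add s y).length + t.length := ih _
        _ ≤ s.length + (t.length + 1) := by omega
        _ = s.length + (y :: t).length := by simp
  simpa [PySem.Set.ofList, PySem.Set.empty] using aux xs []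

-- ===== VERDICT (by name: the statement is the Claim_ definition above) =====
theorem solution_235_2_1_spec : Claim_equal_solution_235_2_1 := by
  intro start e bank _
  unfold Spec_solution_235_2_1 solution_235_2_1 solution_235_2_1_alt
  set B0 := PySem.Set.add (PySem.Set.ofList bank) start with hB0
  have hmem : start ∈ B0 := by
    rw [hB0]; exact (PySem.Set.mem_add _ _ _).mpr (Or.inr rfl)
  have hlen : (PySem.Set.add (PySem.Set.ofList bank) start).length ≤ bank.length + 2 := by
    have h1 := pv_ofList_len bank
    have h2 : (PySem.Set.add (PySem.Set.ofList bank) start).length ≤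
        (PySem.Set.ofList bank).length + 1 := by
      unfold PySem.Set.add; split <;> simp
    omega
  have := pv_s e (bank.length + 2) start 0 B0 [] (by norm_num) (Or.inl hmem) hlen (by omega)
  rw [this]
  by_cases h : (pvSolveA e (bank.length + 2) start 0 B0).1 = -1 <;> simp [h, pvRunB]
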